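-- pv_equiv track=rewrite | github.com/bharddwaj/Intro-CS-Course | musicrecplus.py | drop_matches
-- ===== SOURCE A (Python) =====
-- def drop_matches(list1,list2):
--     '''Returns the list that contains no matches between elements of list1 and list2'''
--     list1.sort()
--     list2.sort()
--     results = []
--     counter1 = 0
--     counter2 = 0
--     while counter1 < len(list1) and counter2 < len(list2):
--         if list1[counter1] == list2[counter2]:
--             counter1 += 1
--             counter2 += 1
--         elif list1[counter1] < list2[counter2]:
--             results.append(list1[counter1])
--             counter1 += 1
--         else:
--             results.append(list2[counter2])
--             counter2 += 1
--     while counter1 < len(list1):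
--         results.append(list1[counter1])
--         counter1 += 1
--     while counter2 < len(list2):
--         results.append(list2[counter2])
--         counter2 += 1
--     return results
-- ===== SOURCE B (Python) =====
-- def drop_matches(list1, list2):
--     '''Returns the list that contains no matches between elements of list1 and list2'''
--     # keep A's observable side effect: both arguments are sorted in place
--     list1.sort()
--     list2.sort()
--     c1 = {}
--     for x in list1:
--         c1[x] = c1.get(x, 0) + 1
--     c2 = {}
--     for x in list2:
--         c2[x] = c2.get(x, 0) + 1
--     out = []
--     for x, n in c1.items():
--         out.extend([x] * max(n - c2.get(x, 0), 0))
--     for x, n in c2.items():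
--         out.extend([x] * max(n - c1.get(x, 0), 0))
--     out.sort()
--     return out
-- ===== Notes on version B (the rewrite author's own statement) =====
-- stated objective: alternative
-- what changed: Replaced the two-pointer merge over the sorted lists by occurrence counting in two dicts, emitting |count1-count2| residual copies of each key and sorting the result.
import Mathlib
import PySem

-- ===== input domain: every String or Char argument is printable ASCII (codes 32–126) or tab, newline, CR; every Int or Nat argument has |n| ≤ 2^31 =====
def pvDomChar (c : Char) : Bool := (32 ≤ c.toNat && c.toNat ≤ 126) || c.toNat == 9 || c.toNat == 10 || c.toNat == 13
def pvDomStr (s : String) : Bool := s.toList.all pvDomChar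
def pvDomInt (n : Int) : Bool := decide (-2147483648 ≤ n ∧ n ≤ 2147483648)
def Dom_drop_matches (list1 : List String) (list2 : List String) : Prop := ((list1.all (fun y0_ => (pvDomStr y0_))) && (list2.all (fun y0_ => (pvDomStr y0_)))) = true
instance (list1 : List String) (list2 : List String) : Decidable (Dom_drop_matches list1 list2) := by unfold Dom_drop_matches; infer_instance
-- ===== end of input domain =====

-- B replaces A's two-pointer merge by dict occurrence counting, emitting the residual copies of
-- each key and sorting (alternative algorithm, same cost class). Equivalence is about the RETURN
-- value; like A, B also sorts the two argument lists in place (same side effect).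

-- ===== PORT A =====
-- trailing 'while counterX < len(listX): results.append(listX[counterX]); counterX += 1' loops
def pvTailLoop (l : List String) (c : Nat) (res : List String) : List String :=
  if h : c < l.length then pvTailLoop l (c + 1) (res ++ [l[c]]) else res
termination_by l.length - c

-- main 'while counter1 < len(list1) and counter2 < len(list2)' loop
def pvMergeLoop (l1 l2 : List String) (c1 c2 : Nat) (res : List String) : List String :=
  if h : c1 < l1.length ∧ c2 < l2.length then
    if l1[c1] = l2[c2] then
      pvMergeLoop l1 l2 (c1 + 1) (c2 + 1) res
    else if l1[c1] < l2[c2] then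
      pvMergeLoop l1 l2 (c1 + 1) c2 (res ++ [l1[c1]])
    else
      pvMergeLoop l1 l2 c1 (c2 + 1) (res ++ [l2[c2]])
  else
    pvTailLoop l2 c2 (pvTailLoop l1 c1 res)
termination_by (l1.length - c1) + (l2.length - c2)

def drop_matches (list1 : List String) (list2 : List String) : List String :=
  let s1 := PySem.List.sorted list1 (fun x => x) false
  let s2 := PySem.List.sorted list2 (fun x => x) false
  pvMergeLoop s1 s2 0 0 []

-- ===== PORT B =====
-- 'for x in s: c[x] = c.get(x, 0) + 1' is exactly PySem.Dict.counter s (counter_eq_foldl);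
-- each 'for x, n in c.items(): out.extend([x] * max(n - other.get(x, 0), 0))' loop is a foldl
-- over the items appending replicate blocks.
def drop_matches_alt (list1 : List String) (list2 : List String) : List String :=
  let s1 := PySem.List.sorted list1 (fun x => x) false
  let s2 := PySem.List.sorted list2 (fun x => x) false
  let c1 := PySem.Dict.counter s1
  let c2 := PySem.Dict.counter s2
  let out1 := c1.items.foldl
    (fun acc p => acc ++ List.replicate (max (p.2 - c2.getD p.1 0) 0).toNat p.1) []
  let out2 := c2.items.foldl
    (fun acc p => acc ++ List.replicate (max (p.2 - c1.getD p.1 0) 0).toNat p.1) out1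
  PySem.List.sorted out2 (fun x => x) false

-- ===== PRECONDITION & SPEC =====
def Spec_drop_matches (list1 : List String) (list2 : List String) (out : List String) : Prop := out = drop_matches_alt list1 list2
instance (list1 : List String) (list2 : List String) (out : List String) : Decidable (Spec_drop_matches list1 list2 out) := by unfold Spec_drop_matches; infer_instance

-- ===== CLAIM (what is proved, stated in full; the proofs are below) =====
def Claim_equal_drop_matches : Prop := ∀ (list1 : List String) (list2 : List String), Dom_drop_matches list1 list2 → Spec_drop_matches list1 list2 (drop_matches list1 list2)

-- ===== LEMMAS AND PROOFS =====

-- canonical structural symmetric-difference merge of two sorted lists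
def pvSd : List String → List String → List String
  | [], ys => ys
  | x :: xs, [] => x :: xs
  | x :: xs, y :: ys =>
    if x = y then pvSd xs ys
    else if x < y then x :: pvSd xs (y :: ys)
    else y :: pvSd (x :: xs) ys

theorem pvTailLoop_eq (l : List String) (c : Nat) (res : List String) :
    pvTailLoop l c res = res ++ l.drop c := by
  fun_induction pvTailLoop with
  | case1 c res h ih => rw [ih, List.drop_eq_getElem_cons h]; simp
  | case2 c res h => rw [List.drop_eq_nil_of_le (by omega)]; simp

theorem pvMergeLoop_eq (l1 l2 : List String) (c1 c2 : Nat) (res : List String) :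
    pvMergeLoop l1 l2 c1 c2 res = res ++ pvSd (l1.drop c1) (l2.drop c2) := by
  fun_induction pvMergeLoop with
  | case1 c1 c2 res h heq ih =>
      rw [ih, List.drop_eq_getElem_cons h.1, List.drop_eq_getElem_cons h.2, pvSd]
      simp [heq]
  | case2 c1 c2 res h hne hlt ih =>
      rw [ih, List.drop_eq_getElem_cons h.1, List.drop_eq_getElem_cons h.2, pvSd]
      simp [hne, hlt]
  | case3 c1 c2 res h hne hnlt ih =>
      rw [ih, List.drop_eq_getElem_cons h.1, List.drop_eq_getElem_cons h.2, pvSd]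
      simp [hne, hnlt]
  | case4 c1 c2 res h =>
      rw [pvTailLoop_eq, pvTailLoop_eq]
      rcases Nat.lt_or_ge c1 l1.length with h1 | h1
      · have h2 : l2.length ≤ c2 := by omega
        rw [List.drop_eq_nil_of_le h2, List.drop_eq_getElem_cons h1, pvSd]
        simp
      · rw [List.drop_eq_nil_of_le h1, pvSd]
        simp

theorem pvSd_mem {a : String} {xs ys : List String} (h : a ∈ pvSd xs ys) : a ∈ xs ∨ a ∈ ys := by
  fun_induction pvSd generalizing a with
  | case1 ys => exact Or.inr h
  | case2 x xs => exact Or.inl h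
  | case3 xs x ys ih =>
      rcases ih h with h1 | h1
      · exact Or.inl (List.mem_cons_of_mem _ h1)
      · exact Or.inr (List.mem_cons_of_mem _ h1)
  | case4 x xs y ys hne hlt ih =>
      rcases List.mem_cons.mp h with rfl | h1
      · exact Or.inl List.mem_cons_self
      · rcases ih h1 with h2 | h2
        · exact Or.inl (List.mem_cons_of_mem _ h2)
        · exact Or.inr h2
  | case5 x xs y ys hne hnlt ih =>
      rcases List.mem_cons.mp h with rfl | h1
      · exact Or.inr List.mem_cons_self
      · rcases ih h1 with h2 | h2
        · exact Or.inl h2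
        · exact Or.inr (List.mem_cons_of_mem _ h2)
theorem pvSd_pairwise {xs ys : List String}
    (hx : xs.Pairwise (· ≤ ·)) (hy : ys.Pairwise (· ≤ ·)) :
    (pvSd xs ys).Pairwise (· ≤ ·) := by
  fun_induction pvSd with
  | case1 ys => exact hy
  | case2 x xs => exact hx
  | case3 xs x ys ih => exact ih hx.of_cons hy.of_cons
  | case4 x xs y ys hne hlt ih =>
      refine List.pairwise_cons.mpr ⟨?_, ih hx.of_cons hy⟩
      intro b hb
      rcases pvSd_mem hb with h1 | h1
      · exact (List.pairwise_cons.mp hx).1 b h1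
      · rcases List.mem_cons.mp h1 with rfl | h2
        · exact le_of_lt hlt
        · exact le_trans (le_of_lt hlt) ((List.pairwise_cons.mp hy).1 b h2)
  | case5 x xs y ys hne hnlt ih =>
      have hyx : y < x := lt_of_le_of_ne (not_lt.mp hnlt) (fun h => hne h.symm)
      refine List.pairwise_cons.mpr ⟨?_, ih hx hy.of_cons⟩
      intro b hb
      rcases pvSd_mem hb with h1 | h1
      · rcases List.mem_cons.mp h1 with rfl | h2
        · exact le_of_lt hyx
        · exact le_trans (le_of_lt hyx) ((List.pairwise_cons.mp hx).1 b h2)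
      · exact (List.pairwise_cons.mp hy).1 b h1

theorem pvCount_zero_of_lt_head {a x : String} {xs : List String}
    (hx : (x :: xs).Pairwise (· ≤ ·)) (h : a < x) : (x :: xs).count a = 0 := by
  rw [List.count_eq_zero]
  intro hmem
  rcases List.mem_cons.mp hmem with rfl | h2
  · exact absurd h (lt_irrefl _)
  · exact absurd (lt_of_lt_of_le h ((List.pairwise_cons.mp hx).1 a h2)) (lt_irrefl _)
theorem pvSd_count {xs ys : List String}
    (hx : xs.Pairwise (· ≤ ·)) (hy : ys.Pairwise (· ≤ ·)) (a : String) :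
    (pvSd xs ys).count a = (xs.count a - ys.count a) + (ys.count a - xs.count a) := by
  fun_induction pvSd with
  | case1 ys => simp
  | case2 x xs => simp
  | case3 xs x ys ih =>
      have hih := ih hx.of_cons hy.of_cons
      simp only [List.count_cons, hih]
      split_ifs <;> omega
  | case4 x xs y ys hne hlt ih =>
      have hih := ih hx.of_cons hy
      by_cases hax : a = x
      · subst hax
        have h0 : (y :: ys).count a = 0 := pvCount_zero_of_lt_head hy hlt
        rw [List.count_cons_self, hih, h0, List.count_cons_self]
        omega
      · have hxa : x ≠ a := fun h => hax h.symm
        rw [List.count_cons_of_ne hxa, hih, List.count_cons_of_ne hxa]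
  | case5 x xs y ys hne hnlt ih =>
      have hyx : y < x := lt_of_le_of_ne (not_lt.mp hnlt) (fun h => hne h.symm)
      have hih := ih hx hy.of_cons
      by_cases hay : a = y
      · subst hay
        have h0 : (x :: xs).count a = 0 := pvCount_zero_of_lt_head hx hyx
        rw [List.count_cons_self, hih, h0, List.count_cons_self]
        omega
      · have hya : y ≠ a := fun h => hay h.symm
        rw [List.count_cons_of_ne hya, hih, List.count_cons_of_ne hya]
theorem pvCount_flatMap (l : List String) (g : String → List String) (b : String) :
    (l.flatMap g).count b = (l.map (fun x => (g x).count b)).sum := by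
  induction l with
  | nil => simp
  | cons x xs ih => simp [List.flatMap_cons, List.count_append, ih]
theorem pvSum_ite_nodup {l : List String} (hn : l.Nodup) (b : String) (f : String → Nat) :
    (l.map (fun x => if x = b then f x else 0)).sum = if b ∈ l then f b else 0 := by
  induction l with
  | nil => simp
  | cons x xs ih =>
      have hx := (List.nodup_cons.mp hn)
      by_cases hxb : x = b
      · subst hxb
        simp [hx.1, ih hx.2]
      · simp [hxb, ih hx.2, Ne.symm hxb]
def pvResidual (s t : List String) : List String :=
  (PySem.Dict.counter s).items.foldl
    (fun acc p => acc ++ List.replicate (max (p.2 - (PySem.Dict.counter t).getD p.1 0) 0).toNat p.1) []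

theorem pvResidual_count (s t : List String) (b : String) :
    (pvResidual s t).count b = s.count b - t.count b := by
  unfold pvResidual
  rw [PySem.List.foldl_append_eq_flatMap, List.nil_append, PySem.Dict.items_counter,
    List.flatMap_map, pvCount_flatMap]
  simp only [PySem.Dict.getD_counter, List.count_replicate, beq_iff_eq]
  rw [pvSum_ite_nodup (PySem.Set.nodup_ofList s) b
    (fun x => (max ((List.count x s : Int) - (List.count x t : Int)) 0).toNat)]
  by_cases hb : b ∈ s
  · rw [if_pos ((PySem.Set.mem_ofList s b).mpr hb)]
    omega
  · rw [if_neg (fun h => hb ((PySem.Set.mem_ofList s b).mp h))]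
    have : s.count b = 0 := by rw [List.count_eq_zero]; exact hb
    omega

theorem drop_matches_spec : Claim_equal_drop_matches := by
  intro list1 list2 _
  unfold Spec_drop_matches drop_matches drop_matches_alt
  rw [pvMergeLoop_eq]
  simp only [List.drop_zero, List.nil_append]
  rw [PySem.List.foldl_append_eq_flatMap]
  symm
  apply PySem.List.sorted_id_eq_of_perm_of_pairwise
  · -- permutation, by counts
    apply List.perm_iff_count.mpr
    intro b
    rw [List.count_append]
    have h2 : (List.flatMap
          (fun p : String × Int =>
            List.replicate (max (p.2 - (PySem.Dict.counter (PySem.List.sorted list1 fun x => x)).getD p.1 0) 0).toNat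
              p.1)
          (PySem.Dict.counter (PySem.List.sorted list2 fun x => x)).items)
        = pvResidual (PySem.List.sorted list2 fun x => x) (PySem.List.sorted list1 fun x => x) := by
      unfold pvResidual
      rw [PySem.List.foldl_append_eq_flatMap, List.nil_append]
    rw [h2]
    have h1 : (List.foldl
          (fun acc p =>
            acc ++
              List.replicate (max (p.2 - (PySem.Dict.counter (PySem.List.sorted list2 fun x => x)).getD p.1 0) 0).toNat
                p.1)
          [] (PySem.Dict.counter (PySem.List.sorted list1 fun x => x)).items)
        = pvResidual (PySem.List.sorted list1 fun x => x) (PySem.List.sorted list2 fun x => x) := rfl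
    rw [h1, pvResidual_count, pvResidual_count,
      pvSd_count (by simpa using PySem.List.sorted_pairwise list1 (fun x => x))
        (by simpa using PySem.List.sorted_pairwise list2 (fun x => x))]
  · exact pvSd_pairwise
      (by simpa using PySem.List.sorted_pairwise list1 (fun x => x))
      (by simpa using PySem.List.sorted_pairwise list2 (fun x => x))
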